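-- pv_equiv track=rewrite | github.com/AlectoSaeglopur/SCIENCE | 2-TLC/CHAINS/Py/scrambler.py | MultDescramb
-- ===== SOURCE A (Python) =====
-- def MultDescramb( InBytes, ConVect, InitState ) :
--     InBits = Byte2BitConv(InBytes)
--     BitLen = len(InBits)
--     RegState = InitState[:]
--     OutBits = [0]*BitLen
--     for j in range(BitLen) :
--         RegBit = (sum([v1*v2 for v1,v2 in zip(RegState,ConVect)])%2)
--         OutBits[j] = InBits[j]^RegBit
--         RegState[1:] = RegState[:-1]
--         RegState[0] = InBits[j]
--     return Bit2ByteConv(OutBits)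
--
-- def Byte2BitConv( InBytes ) :
--     InLen = len(InBytes)
--     OutLen = (InLen<<3)
--     OutBits = [0]*OutLen
--     for j in range(OutLen) :
--         ByteIdx = (j>>3)
--         BitIdx = 7-(j%8)
--         if (InBytes[ByteIdx] >>BitIdx)%2 :
--             OutBits[j] = 1
--     return OutBits
--
-- def Bit2ByteConv( InBits ) :
--     InLen = len(InBits)
--     OutLen = (InLen>>3)
--     OutBytes = [0]*OutLen
--     for j in range(InLen) :
--         if InBits[j] :
--             ByteIdx = (j>>3)
--             BitIdx = 7-(j%8)
--             OutBytes[ByteIdx] += (1<<BitIdx)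
--     return OutBytes
-- ===== SOURCE B (Python) =====
-- def MultDescramb( InBytes, ConVect, InitState ) :
--     InBits = Byte2BitConv(InBytes)
--     K = min(len(InitState), len(ConVect))
--     OutBits = []
--     for j in range(len(InBits)) :
--         acc = 0
--         for i in range(K) :
--             reg = InBits[j-1-i] if i < j else InitState[i-j]
--             acc += reg * ConVect[i]
--         OutBits.append(InBits[j] ^ (acc % 2))
--     return Bit2ByteConv(OutBits)
--
-- def Byte2BitConv( InBytes ) :
--     InLen = len(InBytes)
--     OutLen = (InLen<<3)
--     OutBits = [0]*OutLen
--     for j in range(OutLen) :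
--         ByteIdx = (j>>3)
--         BitIdx = 7-(j%8)
--         if (InBytes[ByteIdx] >>BitIdx)%2 :
--             OutBits[j] = 1
--     return OutBits
--
-- def Bit2ByteConv( InBits ) :
--     InLen = len(InBits)
--     OutLen = (InLen>>3)
--     OutBytes = [0]*OutLen
--     for j in range(InLen) :
--         if InBits[j] :
--             ByteIdx = (j>>3)
--             BitIdx = 7-(j%8)
--             OutBytes[ByteIdx] += (1<<BitIdx)
--     return OutBytes
-- ===== Notes on version B (the rewrite author's own statement) =====
-- stated objective: alternative
-- what changed: B drops the mutable shift-register list (sliced and overwritten each iteration) and instead computes each output bit directly from an index formula over the original bit stream and the initial state, appending results; the byte/bit conversion helpers are unchanged.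
-- outside the precondition, e.g. on MultDescramb([1], [1], []): A raises IndexError, B returns [1]
import Mathlib
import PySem

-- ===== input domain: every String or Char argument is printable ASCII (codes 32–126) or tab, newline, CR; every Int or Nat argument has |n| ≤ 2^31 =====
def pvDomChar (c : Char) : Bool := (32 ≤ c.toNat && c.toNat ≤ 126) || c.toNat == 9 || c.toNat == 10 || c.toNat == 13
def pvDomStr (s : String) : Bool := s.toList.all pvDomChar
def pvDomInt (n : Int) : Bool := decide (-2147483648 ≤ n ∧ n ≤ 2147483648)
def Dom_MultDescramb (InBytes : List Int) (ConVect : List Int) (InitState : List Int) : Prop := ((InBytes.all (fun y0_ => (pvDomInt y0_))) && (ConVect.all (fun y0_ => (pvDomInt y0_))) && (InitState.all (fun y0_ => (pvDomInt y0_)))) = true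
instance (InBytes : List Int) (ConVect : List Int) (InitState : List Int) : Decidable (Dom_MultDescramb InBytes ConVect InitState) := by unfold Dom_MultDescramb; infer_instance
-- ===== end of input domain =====

-- B replaces A's mutable shift-register (list slicing each step) by a direct index formula
-- per output bit (different decomposition, not faster); both ports share the unchanged
-- byte/bit conversion helpers.

-- ===== PORT A =====
-- shared helper: Byte2BitConv (Python loop setting OutBits[j]; `x >> k` on Int = floor division by 2^k, exact)
def Byte2BitConv (InBytes : List Int) : List Int :=
  let InLen := InBytes.length
  let OutLen := InLen * 8
  (List.range OutLen).foldl (fun OutBits j =>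
    let ByteIdx := j / 8
    let BitIdx := 7 - (j % 8)
    if PySem.Int.mod (PySem.Int.floordiv (InBytes.getD ByteIdx 0) ((2:Int)^BitIdx)) 2 ≠ 0 then
      OutBits.set j 1
    else OutBits) (List.replicate OutLen (0:Int))

-- shared helper: Bit2ByteConv (`1 << k` = 2^k; truthiness `if InBits[j]` = ≠ 0)
def Bit2ByteConv (InBits : List Int) : List Int :=
  let InLen := InBits.length
  let OutLen := InLen / 8
  (List.range InLen).foldl (fun OutBytes j =>
    if InBits.getD j 0 ≠ 0 then
      let ByteIdx := j / 8
      let BitIdx := 7 - (j % 8)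
      OutBytes.set ByteIdx (OutBytes.getD ByteIdx 0 + (2:Int)^BitIdx)
    else OutBytes) (List.replicate OutLen (0:Int))

-- one iteration of A's loop body on the state (RegState, OutBits);
-- `RegState[1:] = RegState[:-1]; RegState[0] = InBits[j]` is the shifted list with slot 0
-- overwritten (exact for nonempty RegState; RegState = [] raises in Python, excluded by Pre_)
def stepA (InBits ConVect : List Int) (st : List Int × List Int) (j : Nat) : List Int × List Int :=
  let RegState := st.1
  let OutBits := st.2
  let RegBit := PySem.Int.mod (((RegState.zip ConVect).map (fun p => p.1 * p.2)).sum) 2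
  let OutBits' := OutBits.set j (PySem.Int.bxor (InBits.getD j 0) RegBit)
  let RegState' := (RegState.take 1 ++ RegState.dropLast).set 0 (InBits.getD j 0)
  (RegState', OutBits')

def MultDescramb (InBytes : List Int) (ConVect : List Int) (InitState : List Int) : List Int :=
  let InBits := Byte2BitConv InBytes
  let BitLen := InBits.length
  let res := (List.range BitLen).foldl (stepA InBits ConVect) (InitState, List.replicate BitLen (0:Int))
  Bit2ByteConv res.2

-- ===== PORT B =====
-- B's per-bit formula: OutBits[j] = InBits[j] ^ parity of sum of reg(j,i)*ConVect[i], i < K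
def valB (InBits ConVect InitState : List Int) (K j : Nat) : Int :=
  let acc := (List.range K).foldl (fun a i =>
    let reg := if i < j then InBits.getD (j - 1 - i) 0 else InitState.getD (i - j) 0
    a + reg * ConVect.getD i 0) 0
  PySem.Int.bxor (InBits.getD j 0) (PySem.Int.mod acc 2)

def MultDescramb_alt (InBytes : List Int) (ConVect : List Int) (InitState : List Int) : List Int :=
  let InBits := Byte2BitConv InBytes
  let K := min InitState.length ConVect.length
  let OutBits := (List.range InBits.length).map (valB InBits ConVect InitState K)
  Bit2ByteConv OutBits

-- ===== PRECONDITION & SPEC =====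
-- Pre_ excludes InitState = [] with nonempty InBytes, where A raises IndexError
-- (RegState[0] = … on an empty register); B returns a value there.
def Pre_MultDescramb (InBytes : List Int) (ConVect : List Int) (InitState : List Int) : Prop :=
  InBytes = [] ∨ InitState ≠ []
instance (InBytes : List Int) (ConVect : List Int) (InitState : List Int) : Decidable (Pre_MultDescramb InBytes ConVect InitState) := by unfold Pre_MultDescramb; infer_instance
def pvWitness_MultDescramb : List Int × List Int × List Int := ([1, 2], [1, 0, 1], [1, 1, 1])

def Spec_MultDescramb (InBytes : List Int) (ConVect : List Int) (InitState : List Int) (out : List Int) : Prop := out = MultDescramb_alt InBytes ConVect InitState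
instance (InBytes : List Int) (ConVect : List Int) (InitState : List Int) (out : List Int) : Decidable (Spec_MultDescramb InBytes ConVect InitState out) := by unfold Spec_MultDescramb; infer_instance

-- ===== CLAIM (what is proved, stated in full; the proofs are below) =====
def Claim_equal_MultDescramb : Prop := ∀ (InBytes : List Int) (ConVect : List Int) (InitState : List Int), Dom_MultDescramb InBytes ConVect InitState → Pre_MultDescramb InBytes ConVect InitState → Spec_MultDescramb InBytes ConVect InitState (MultDescramb InBytes ConVect InitState)
-- ===== LEMMAS AND PROOFS =====

-- the register contents before iteration j, in closed form
def regAt (InBits InitState : List Int) (j : Nat) : List Int :=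
  ((InBits.take j).reverse ++ InitState).take InitState.length

-- the value A writes into OutBits[j]
def valA (InBits ConVect InitState : List Int) (j : Nat) : Int :=
  PySem.Int.bxor (InBits.getD j 0)
    (PySem.Int.mod (((( regAt InBits InitState j).zip ConVect).map (fun p => p.1 * p.2)).sum) 2)

lemma regAt_zero (InBits InitState : List Int) : regAt InBits InitState 0 = InitState := by
  simp [regAt]

lemma shift_set (l : List Int) (x : Int) (h : l ≠ []) :
    (l.take 1 ++ l.dropLast).set 0 x = x :: l.dropLast := by
  cases l with | nil => simp_all | cons a t => simp

lemma regAt_step (InBits InitState : List Int) (j : Nat) (hj : j < InBits.length) :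
    ((regAt InBits InitState j).take 1 ++ (regAt InBits InitState j).dropLast).set 0
      (InBits.getD j 0) = regAt InBits InitState (j + 1) := by
  rcases InitState with _ | ⟨a, t⟩
  · simp [regAt]
  · have hne : regAt InBits (a :: t) j ≠ [] := by
      unfold regAt
      intro h
      have := congrArg List.length h
      simp at this
    rw [shift_set _ _ hne]
    unfold regAt
    have ht : InBits.take (j+1) = InBits.take j ++ [InBits[j]] := by
      rw [List.take_add_one, List.getElem?_eq_getElem hj]
      rfl
    rw [ht, List.reverse_append, List.getD_eq_getElem _ _ hj]
    have hu : (a :: t).length ≤ ((InBits.take j).reverse ++ a :: t).length := by simp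
    set u := (InBits.take j).reverse ++ a :: t with hudef
    have h1 : (u.take (a :: t).length).dropLast = u.take ((a :: t).length - 1) := by
      rw [List.dropLast_eq_take, List.take_take]
      congr 1
      rw [List.length_take]
      omega
    rw [h1]
    show _ = List.take (t.length + 1) ([InBits[j]].reverse ++ u)
    rw [List.reverse_singleton, List.singleton_append, List.take_succ_cons]
    simp

lemma foldl_stepA (InBits ConVect InitState out0 : List Int) (n : Nat) (hn : n ≤ InBits.length) :
    (List.range n).foldl (stepA InBits ConVect) (InitState, out0)
      = (regAt InBits InitState n,
         (List.range n).foldl (fun out j => out.set j (valA InBits ConVect InitState j)) out0) := by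
  induction n with
  | zero => simp [regAt_zero]
  | succ n ih =>
    rw [List.range_succ, List.foldl_append, List.foldl_append, ih (by omega)]
    simp only [List.foldl_cons, List.foldl_nil]
    unfold stepA valA
    dsimp only
    rw [regAt_step _ _ _ (by omega)]

lemma set_fold_aux (f : Nat → Int) (out0 : List Int) (n : Nat) (h : n ≤ out0.length) :
    (List.range n).foldl (fun out j => out.set j (f j)) out0
      = (List.range n).map f ++ out0.drop n := by
  induction n with
  | zero => simp
  | succ n ih =>
    rw [List.range_succ, List.foldl_append, ih (by omega)]
    rw [List.foldl_cons, List.foldl_nil]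
    rw [List.set_append_right _ _ (by simp)]
    simp only [List.length_map, List.length_range, Nat.sub_self]
    rw [List.drop_eq_getElem_cons (by omega : n < out0.length), List.set_cons_zero]
    rw [List.map_append, List.map_cons, List.map_nil]
    simp

lemma set_fold_eq_map (f : Nat → Int) (n : Nat) :
    (List.range n).foldl (fun out j => out.set j (f j)) (List.replicate n (0:Int))
      = (List.range n).map f := by
  rw [set_fold_aux f _ n (by simp)]
  simp

lemma zip_map_eq (InBits ConVect InitState : List Int) (j : Nat) (hj : j ≤ InBits.length) :
    ((regAt InBits InitState j).zip ConVect).map (fun p => p.1 * p.2)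
      = (List.range (min InitState.length ConVect.length)).map (fun i =>
          (if i < j then InBits.getD (j - 1 - i) 0 else InitState.getD (i - j) 0)
            * ConVect.getD i 0) := by
  have hreg : (regAt InBits InitState j).length = InitState.length := by
    simp [regAt]
  apply List.ext_getElem
  · simp [hreg]
  · intro i h1 h2
    simp only [List.getElem_map, List.getElem_zip, List.getElem_range]
    have hiK : i < min InitState.length ConVect.length := by simp_all
    have hiL : i < InitState.length := by omega
    have hiC : i < ConVect.length := by omega
    rw [List.getD_eq_getElem _ _ hiC]
    congr 1
    have : (regAt InBits InitState j)[i] = ((InBits.take j).reverse ++ InitState)[i]'(by simp; omega) := by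
      simp [regAt, List.getElem_take]
    rw [this]
    by_cases hij : i < j
    · rw [List.getElem_append_left (by simp; omega)]
      rw [List.getElem_reverse]
      rw [List.getElem_take]
      simp only [hij, if_pos]
      rw [List.getD_eq_getElem _ _ (by omega : j - 1 - i < InBits.length)]
      congr 1
      simp
      omega
    · rw [List.getElem_append_right (by simp; omega)]
      simp only [hij, if_false]
      have hrl : (List.take j InBits).reverse.length = j := by simp; omega
      rw [List.getD_eq_getElem _ _ (by omega : i - j < InitState.length)]
      congr 1
      rw [hrl]

lemma valA_eq_valB (InBits ConVect InitState : List Int) (j : Nat) (hj : j ≤ InBits.length) :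
    valA InBits ConVect InitState j
      = valB InBits ConVect InitState (min InitState.length ConVect.length) j := by
  unfold valA valB
  dsimp only
  congr 2
  rw [zip_map_eq InBits ConVect InitState j hj]
  rw [PySem.List.foldl_add]
  simp

-- ===== VERDICT (by name: the statement is the Claim_ definition above) =====
theorem MultDescramb_spec : Claim_equal_MultDescramb := by
  intro InBytes ConVect InitState _ _
  unfold Spec_MultDescramb MultDescramb MultDescramb_alt
  dsimp only
  rw [foldl_stepA _ _ _ _ _ (le_refl _)]
  rw [set_fold_eq_map]
  congr 1
  exact List.map_congr_left (fun j hj => valA_eq_valB _ _ _ _ (le_of_lt (List.mem_range.mp hj)))
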